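-- pv_equiv track=rewrite | github.com/VSmirno/agi | experiments/stage90r_collect_local_dataset.py | _summarize_action_distribution_by_regime
-- ===== SOURCE A (Python) =====
-- from collections import Counter, defaultdict
-- from typing import Any
--
-- def _summarize_action_distribution_by_regime(samples: list[dict[str, Any]]) -> dict[str, dict[str, int]]:
--     by_regime: dict[str, Counter[str]] = defaultdict(Counter)
--     for sample in samples:
--         regime = str(sample.get("primary_regime", "unknown"))
--         by_regime[regime][str(sample.get("action", "unknown"))] += 1
--     return {
--         regime: dict(sorted(counter.items()))
--         for regime, counter in sorted(by_regime.items())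
--     }
-- ===== SOURCE B (Python) =====
-- def _summarize_action_distribution_by_regime(samples):
--     pairs = [(str(s.get("primary_regime", "unknown")), str(s.get("action", "unknown")))
--              for s in samples]
--     return {
--         r: {a: pairs.count((r, a))
--             for a in sorted({a for rr, a in pairs if rr == r})}
--         for r in sorted({r for r, _ in pairs})
--     }
-- ===== Notes on version B (the rewrite author's own statement) =====
-- stated objective: alternative
-- what changed: Replaces the incrementally built defaultdict-of-Counters plus final sort with a direct comprehension: collect (regime, action) pairs once, then build the nested dict from the sorted distinct regimes/actions, counting each pair with list.count.
import Mathlib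
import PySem

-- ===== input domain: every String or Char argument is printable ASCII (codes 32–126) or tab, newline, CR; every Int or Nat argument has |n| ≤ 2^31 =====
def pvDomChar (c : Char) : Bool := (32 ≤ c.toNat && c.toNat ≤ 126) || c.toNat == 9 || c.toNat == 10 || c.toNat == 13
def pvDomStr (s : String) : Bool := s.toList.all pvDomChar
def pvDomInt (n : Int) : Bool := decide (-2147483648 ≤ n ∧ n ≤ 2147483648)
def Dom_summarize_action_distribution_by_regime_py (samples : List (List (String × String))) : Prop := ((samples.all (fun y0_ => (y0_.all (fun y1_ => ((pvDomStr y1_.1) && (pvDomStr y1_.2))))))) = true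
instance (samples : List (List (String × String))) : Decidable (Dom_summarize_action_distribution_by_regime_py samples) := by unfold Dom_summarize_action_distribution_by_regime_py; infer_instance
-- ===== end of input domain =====

-- B replaces A's incrementally built defaultdict-of-Counters (plus final sorts) by a direct
-- comprehension over the collected (regime, action) pairs: sorted distinct regimes/actions,
-- counting each pair with list.count — objective: alternative (no speed claim).

-- ===== PORT A =====
-- sorted() on the (key, value) tuples of a dict never compares the values, because the keys are
-- distinct; it is therefore ported as a sort keyed on the first component.
def summarize_action_distribution_by_regime_py (samples : List (List (String × String))) : List (String × List (String × Int)) :=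
  let by_regime : PySem.Dict String (PySem.Dict String Int) :=
    samples.foldl (fun d s =>
      let regime := (PySem.Dict.mk s).getD "primary_regime" "unknown"
      d.insert regime
        ((d.getD regime PySem.Dict.empty).modify ((PySem.Dict.mk s).getD "action" "unknown") 0 (· + 1)))
      PySem.Dict.empty
  (PySem.List.sorted by_regime.items (fun p => p.1)).map
    (fun p => (p.1, PySem.List.sorted p.2.items (fun q => q.1)))

-- ===== PORT B =====
def summarize_action_distribution_by_regime_py_alt (samples : List (List (String × String))) : List (String × List (String × Int)) :=
  let pairs := samples.map (fun s =>
    ((PySem.Dict.mk s).getD "primary_regime" "unknown", (PySem.Dict.mk s).getD "action" "unknown"))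
  (PySem.List.sorted (PySem.Set.ofList (pairs.map (fun p => p.1))) (fun x => x)).map
    (fun r => (r,
      (PySem.List.sorted (PySem.Set.ofList ((pairs.filter (fun p => p.1 == r)).map (fun p => p.2))) (fun x => x)).map
        (fun a => (a, (pairs.count (r, a) : Int)))))

-- ===== PRECONDITION & SPEC =====
def Spec_summarize_action_distribution_by_regime_py (samples : List (List (String × String))) (out : List (String × List (String × Int))) : Prop := out = summarize_action_distribution_by_regime_py_alt samples
instance (samples : List (List (String × String))) (out : List (String × List (String × Int))) : Decidable (Spec_summarize_action_distribution_by_regime_py samples out) := by unfold Spec_summarize_action_distribution_by_regime_py; infer_instance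

-- ===== CLAIM (what is proved, stated in full; the proofs are below) =====
def Claim_equal_summarize_action_distribution_by_regime_py : Prop := ∀ (samples : List (List (String × String))), Dom_summarize_action_distribution_by_regime_py samples → Spec_summarize_action_distribution_by_regime_py samples (summarize_action_distribution_by_regime_py samples)

-- ===== LEMMAS AND PROOFS =====

-- the (regime, action) key pair extracted from one sample
def pvKey (s : List (String × String)) : String × String :=
  ((PySem.Dict.mk s).getD "primary_regime" "unknown", (PySem.Dict.mk s).getD "action" "unknown")

-- one step of A's loop, expressed on the key pair
def pvStep (d : PySem.Dict String (PySem.Dict String Int)) (p : String × String) : PySem.Dict String (PySem.Dict String Int) :=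
  d.insert p.1 ((d.getD p.1 PySem.Dict.empty).modify p.2 0 (· + 1))
def pvCtr (l : List (String × String)) (r : String) : PySem.Dict String Int :=
  PySem.Dict.counter ((l.filter (fun p => p.1 == r)).map (fun p => p.2))
theorem pv_set_append_singleton {α : Type} [BEq α] (xs : List α) (x : α) :
    PySem.Set.ofList (xs ++ [x]) = PySem.Set.add (PySem.Set.ofList xs) x := by
  simp [PySem.Set.ofList_eq_foldl, List.foldl_append]

theorem pv_fold_items (l : List (String × String)) :
    (l.foldl pvStep PySem.Dict.empty).items
      = (PySem.Set.ofList (l.map (fun p => p.1))).map (fun r => (r, pvCtr l r)) := by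
  induction l using List.reverseRecOn with
  | nil => rfl
  | append_singleton l p ih =>
    set D := l.foldl pvStep PySem.Dict.empty with hD
    have hkeys : D.keys = PySem.Set.ofList (l.map (fun p => p.1)) := by
      simp [PySem.Dict.keys, ih, Function.comp_def]
    have hnd : D.keys.Nodup := by rw [hkeys]; exact PySem.Set.nodup_ofList _
    have hcont : D.contains p.1 = true ↔ p.1 ∈ l.map (fun p => p.1) := by
      rw [PySem.Dict.contains_iff_mem_keys, hkeys, PySem.Set.mem_ofList]
    rw [List.foldl_append]
    simp only [List.foldl_cons, List.foldl_nil]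
    show (pvStep D p).items = _
    unfold pvStep
    rw [PySem.Dict.items_insert, List.map_append]
    simp only [List.map_cons, List.map_nil]
    rw [pv_set_append_singleton]
    by_cases hmem : p.1 ∈ l.map (fun p => p.1)
    · have hc : D.contains p.1 = true := hcont.mpr hmem
      rw [if_pos hc]
      have hadd : PySem.Set.add (PySem.Set.ofList (l.map (fun p => p.1))) p.1
          = PySem.Set.ofList (l.map (fun p => p.1)) := by
        unfold PySem.Set.add
        rw [if_pos]
        simp [PySem.Set.contains, hmem]
      rw [hadd, ih, List.map_map]
      have hget : D.getD p.1 PySem.Dict.empty = pvCtr l p.1 := by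
        apply PySem.Dict.getD_of_mem_items D _ hnd
        rw [ih]
        exact List.mem_map_of_mem ((PySem.Set.mem_ofList _ _).mpr hmem)
      rw [hget]
      apply List.map_congr_left
      intro r _
      simp only [Function.comp_apply]
      by_cases hr : r = p.1
      · subst hr
        rw [if_pos (by simp)]
        unfold pvCtr
        rw [List.filter_append]
        have h1 : List.filter (fun q => q.1 == p.1) [p] = [p] := by simp
        rw [h1, List.map_append, List.map_cons, List.map_nil,
          PySem.Dict.counter_append_singleton]
      · rw [if_neg (by simp [hr])]
        unfold pvCtr
        rw [List.filter_append]
        have h1 : List.filter (fun q => q.1 == r) [p] = [] := by simp [Ne.symm hr]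
        rw [h1, List.append_nil]
    · have hc : D.contains p.1 = false := by
        rw [Bool.eq_false_iff]; intro h; exact hmem (hcont.mp h)
      rw [if_neg (by simp [hc])]
      have hgete : D.getD p.1 PySem.Dict.empty = PySem.Dict.empty :=
        PySem.Dict.getD_of_not_contains _ _ hc
      have hadd : PySem.Set.add (PySem.Set.ofList (l.map (fun p => p.1))) p.1
          = PySem.Set.ofList (l.map (fun p => p.1)) ++ [p.1] := by
        unfold PySem.Set.add
        rw [if_neg]
        simp [PySem.Set.contains, hmem]
      rw [hadd, ih, hgete, List.map_append]
      congr 1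
      · apply List.map_congr_left
        intro r hrS
        have hrl : r ∈ l.map (fun p => p.1) := (PySem.Set.mem_ofList _ _).mp hrS
        have hr : r ≠ p.1 := fun h => hmem (h ▸ hrl)
        unfold pvCtr
        rw [List.filter_append]
        have : List.filter (fun q => q.1 == r) [p] = [] := by
          simp [List.filter, show (p.1 == r) = false by simp [Ne.symm hr]]
        rw [this, List.append_nil]
      · simp only [List.map_cons, List.map_nil]
        unfold pvCtr
        have hnil : List.filter (fun q => q.1 == p.1) l = [] := by
          apply List.filter_eq_nil_iff.mpr
          intro q hq hb
          exact hmem (by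
            have : q.1 = p.1 := by simpa using hb
            exact this ▸ List.mem_map_of_mem hq)
        rw [List.filter_append, hnil, List.nil_append]
        simp [List.filter, PySem.Dict.counter]

theorem pv_count (l : List (String × String)) (r a : String) :
    ((l.filter (fun p => p.1 == r)).map (fun p => p.2)).count a = l.count (r, a) := by
  induction l with
  | nil => rfl
  | cons p t ih =>
    rcases p with ⟨x, y⟩
    by_cases hx : x = r
    · by_cases hy : y = a
      · simp [hx, hy, ih]
      · simp [hx, hy, ih, Prod.ext_iff]
    · simp [hx, ih, Prod.ext_iff]

theorem pv_sorted_counter (as : List String) :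
    PySem.List.sorted (PySem.Dict.counter as).items (fun q => q.1)
      = (PySem.List.sorted (PySem.Set.ofList as) (fun x => x)).map
          (fun a => (a, (as.count a : Int))) := by
  apply PySem.List.sorted_eq_of_perm_of_pairwise_lt
  · rw [PySem.Dict.items_counter]
    exact (PySem.List.sorted_perm _ _ _).map _
  · rw [List.pairwise_map]
    exact PySem.List.sorted_ofList_pairwise_lt as

theorem pv_sorted_outer (l : List (String × String)) :
    PySem.List.sorted (l.foldl pvStep PySem.Dict.empty).items (fun p => p.1)
      = (PySem.List.sorted (PySem.Set.ofList (l.map (fun p => p.1))) (fun x => x)).map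
          (fun r => (r, pvCtr l r)) := by
  apply PySem.List.sorted_eq_of_perm_of_pairwise_lt
  · rw [pv_fold_items]
    exact (PySem.List.sorted_perm _ _ _).map _
  · rw [List.pairwise_map]
    exact PySem.List.sorted_ofList_pairwise_lt _

theorem pv_main (l : List (String × String)) :
    (PySem.List.sorted (l.foldl pvStep PySem.Dict.empty).items (fun p => p.1)).map
        (fun p => (p.1, PySem.List.sorted p.2.items (fun q => q.1)))
      = (PySem.List.sorted (PySem.Set.ofList (l.map (fun p => p.1))) (fun x => x)).map
          (fun r => (r,
            (PySem.List.sorted (PySem.Set.ofList ((l.filter (fun p => p.1 == r)).map (fun p => p.2))) (fun x => x)).map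
              (fun a => (a, (l.count (r, a) : Int))))) := by
  rw [pv_sorted_outer, List.map_map]
  apply List.map_congr_left
  intro r _
  simp only [Function.comp_apply]
  unfold pvCtr
  rw [pv_sorted_counter]
  refine congrArg (fun z => (r, z)) ?_
  apply List.map_congr_left
  intro a _
  rw [pv_count]

-- ===== VERDICT (by name: the statement is the Claim_ definition above) =====
theorem summarize_action_distribution_by_regime_py_spec : Claim_equal_summarize_action_distribution_by_regime_py := by
  intro samples _
  unfold Spec_summarize_action_distribution_by_regime_py
  show (PySem.List.sorted (samples.foldl _ PySem.Dict.empty).items _).map _ = _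
  have h1 : samples.foldl (fun d s =>
      let regime := (PySem.Dict.mk s).getD "primary_regime" "unknown"
      d.insert regime
        ((d.getD regime PySem.Dict.empty).modify ((PySem.Dict.mk s).getD "action" "unknown") 0 (· + 1)))
      PySem.Dict.empty = (samples.map pvKey).foldl pvStep PySem.Dict.empty := by
    rw [List.foldl_map]; rfl
  rw [h1, pv_main]
  rfl
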